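-- pv_equiv track=rewrite | github.com/shahiam/ZopuDe_AAD_FinalProject | Code-Implementations/Randomised-Routing/randomised_routing.py | get_bit_fixing_path
-- ===== SOURCE A (Python) =====
-- def get_bit_fixing_path(src, dst, dims):
--     """
--     Calculates the deterministic bit-fixing path between two nodes in a Hypercube.
--
--     This algorithm traverses the hypercube by fixing the address bits from the
--     least significant bit (dimension 0) to the most significant bit.
--
--     Args:
--         src (int): The source node identifier (integer representation).
--         dst (int): The destination node identifier.
--         dims (int): The dimension of the hypercube.
--
--     Returns:
--         list of tuple: A list of edges representing the path. Each edge is a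
--         sorted tuple (u, v) to ensure undirected edge representation.
--     """
--     path_edges = []
--     current = src
--     diff = src ^ dst
--
--     for i in range(dims):
--         # Check if the i-th bit is different
--         if (diff >> i) & 1:
--             next_node = current ^ (1 << i)
--
--             # We sort the edge tuple (u, v) to ensure that traffic from A->B
--             # and B->A counts as using the same wire. This creates the collision.
--             edge = tuple(sorted((current, next_node)))
--             path_edges.append(edge)
--             current = next_node
--
--     return path_edges
-- ===== SOURCE B (Python) =====
-- def get_bit_fixing_path(src, dst, dims):
--     """Bit-fixing hypercube path, stateless: each edge is computed directly
--     from src and the already-fixed low bits, with no loop-carried current node."""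
--     diff = src ^ dst
--
--     def edge(i):
--         # node reached after fixing all differing bits below i
--         base = src ^ (diff & ((1 << i) - 1))
--         return tuple(sorted((base, base ^ (1 << i))))
--
--     return [edge(i) for i in range(dims) if (diff >> i) & 1]
-- ===== Notes on version B (the rewrite author's own statement) =====
-- stated objective: alternative
-- what changed: The loop-carried 'current' accumulator is removed: B computes each path edge independently in closed form (base = src ^ (diff & ((1<<i)-1))) and builds the edge list as a filter/map comprehension over the dimensions instead of a stateful fold.
import Mathlib
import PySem

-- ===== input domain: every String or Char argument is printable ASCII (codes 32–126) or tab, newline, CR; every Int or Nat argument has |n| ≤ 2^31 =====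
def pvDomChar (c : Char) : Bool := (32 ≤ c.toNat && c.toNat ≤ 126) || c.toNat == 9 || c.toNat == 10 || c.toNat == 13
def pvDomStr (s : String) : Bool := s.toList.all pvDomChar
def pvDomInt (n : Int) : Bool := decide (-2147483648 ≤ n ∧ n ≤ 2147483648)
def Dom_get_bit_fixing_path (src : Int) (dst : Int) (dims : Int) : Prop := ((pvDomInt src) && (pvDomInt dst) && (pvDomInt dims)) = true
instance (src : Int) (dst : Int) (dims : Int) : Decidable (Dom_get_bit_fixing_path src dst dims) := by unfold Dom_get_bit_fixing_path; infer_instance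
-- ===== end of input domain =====

-- B removes A's loop-carried `current` node: each edge is computed independently in
-- closed form from src and the already-fixed low bits (objective: alternative decomposition).

-- tuple(sorted((u, v))) for two ints
def pvSortPair (u v : Int) : Int × Int := if u ≤ v then (u, v) else (v, u)

-- ===== PORT A =====
-- loop body of A: state = (path_edges, current); i ≥ 0 always (it comes from range(dims)),
-- so shifting by i.toNat is exactly Python's `>> i` / `<< i`.
def pvStepA (diff : Int) (st : List (Int × Int) × Int) (i : Int) : List (Int × Int) × Int :=
  if PySem.Int.band (diff >>> i.toNat) 1 ≠ 0 then
    let next_node := PySem.Int.bxor st.2 ((1 : Int) <<< i.toNat)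
    (st.1 ++ [pvSortPair st.2 next_node], next_node)
  else st

def get_bit_fixing_path (src : Int) (dst : Int) (dims : Int) : List (Int × Int) :=
  let diff := PySem.Int.bxor src dst
  ((PySem.List.pyRange 0 dims).foldl (pvStepA diff) ([], src)).1

-- ===== PORT B =====
-- B's edge(i): base = src ^ (diff & ((1 << i) - 1)); edge = sorted (base, base ^ (1 << i))
def pvEdgeB (src diff : Int) (i : Int) : Int × Int :=
  let base := PySem.Int.bxor src (PySem.Int.band diff (((1 : Int) <<< i.toNat) - 1))
  pvSortPair base (PySem.Int.bxor base ((1 : Int) <<< i.toNat))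

def get_bit_fixing_path_alt (src : Int) (dst : Int) (dims : Int) : List (Int × Int) :=
  let diff := PySem.Int.bxor src dst
  ((PySem.List.pyRange 0 dims).filter
      (fun i => PySem.Int.band (diff >>> i.toNat) 1 != 0)).map (pvEdgeB src diff)

-- ===== PRECONDITION & SPEC =====
def Spec_get_bit_fixing_path (src : Int) (dst : Int) (dims : Int) (out : List (Int × Int)) : Prop := out = get_bit_fixing_path_alt src dst dims
instance (src : Int) (dst : Int) (dims : Int) (out : List (Int × Int)) : Decidable (Spec_get_bit_fixing_path src dst dims out) := by unfold Spec_get_bit_fixing_path; infer_instance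

-- ===== CLAIM (what is proved, stated in full; the proofs are below) =====
def Claim_equal_get_bit_fixing_path : Prop := ∀ (src : Int) (dst : Int) (dims : Int), Dom_get_bit_fixing_path src dst dims → Spec_get_bit_fixing_path src dst dims (get_bit_fixing_path src dst dims)

-- ===== LEMMAS AND PROOFS =====

lemma pv_shl1 (n : Nat) : ((1 : Int) <<< n) = 2 ^ n := by
  induction n with
  | zero => rfl
  | succ k ih => rw [pow_succ, Int.shiftLeft_succ, ih]

lemma pv_shr (a : Int) (n : Nat) : a >>> n = a / (2 ^ n : Int) := by
  rw [Int.shiftRight_eq_div_pow]; push_cast; ring_nf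

-- bit test: Python's `(a >> n) & 1` is nonzero exactly when (a / 2^n) % 2 = 1
lemma pv_bit_cond (a : Int) (n : Nat) :
    (PySem.Int.band (a >>> n) 1 ≠ 0) ↔ (a / 2 ^ n) % 2 = 1 := by
  rw [PySem.Int.band_one, PySem.Int.mod_eq_emod_of_pos (by norm_num), pv_shr]
  rcases Int.emod_two_eq_zero_or_one (a / 2 ^ n) with h | h <;> simp [h]

-- Python's mask `a & ((1 << n) - 1)` is floor-mod by 2^n, for every (also negative) a
lemma pv_band_mask (a : Int) (n : Nat) :
    PySem.Int.band a (((1 : Int) <<< n) - 1) = a % (2 ^ n : Int) := by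
  rw [pv_shl1]
  have h2 : (0 : Int) < 2 ^ n := by positivity
  have hc : ((2 ^ n : Nat) : Int) = 2 ^ n := by push_cast; ring
  have h1 : ((2 : Int) ^ n - 1).toNat = 2 ^ n - 1 := by omega
  by_cases hs : 0 ≤ a
  · rw [PySem.Int.band_of_nonneg hs (by omega), h1, Nat.and_two_pow_sub_one_eq_mod,
      Int.natCast_mod]
    rw [Int.toNat_of_nonneg hs, hc]
  · rw [PySem.Int.band.eq_1, if_neg hs, if_pos (by omega : (0:Int) ≤ 2 ^ n - 1), h1]
    set m := (-a - 1).toNat with hmdef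
    have hma : a = -(m : Int) - 1 := by omega
    rw [Nat.and_comm, Nat.and_two_pow_sub_one_eq_mod]
    have hmlt : m % 2 ^ n < 2 ^ n := Nat.mod_lt _ (Nat.two_pow_pos n)
    have hm2 : (m : Int) = 2 ^ n * ↑(m / 2 ^ n) + ↑(m % 2 ^ n) := by
      exact_mod_cast (Nat.div_add_mod m (2 ^ n)).symm
    have hrhs : a % (2 ^ n : Int) = (2 ^ n : Int) - 1 - ↑(m % 2 ^ n) := by
      have h1' : a = ((2 ^ n : Int) - 1 - ↑(m % 2 ^ n)) + 2 ^ n * (-(↑(m / 2 ^ n)) - 1) := by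
        rw [hma]
        nth_rewrite 1 [hm2]
        ring
      rw [h1', Int.add_mul_emod_self_left]
      exact Int.emod_eq_of_lt (by omega) (by omega)
    rw [hrhs]
    omega

lemma pv_xor_two_pow (m n : Nat) (h : m < 2 ^ n) : m ^^^ 2 ^ n = m + 2 ^ n := by
  refine Nat.eq_of_testBit_eq fun i => ?_
  rcases lt_trichotomy i n with h1 | rfl | h1
  · rw [Nat.testBit_xor, Nat.testBit_two_pow_of_ne (by omega),
      Nat.add_comm, Nat.testBit_two_pow_add_gt h1]
    simp
  · rw [Nat.testBit_xor, Nat.testBit_two_pow_self, Nat.testBit_lt_two_pow h,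
      Nat.add_comm, Nat.testBit_two_pow_add_eq, Nat.testBit_lt_two_pow h]
    rfl
  · rw [Nat.testBit_xor, Nat.testBit_two_pow_of_ne (by omega),
      Nat.testBit_lt_two_pow (lt_of_lt_of_le h (Nat.pow_le_pow_right (by norm_num) (by omega))),
      Nat.testBit_lt_two_pow (by
        calc m + 2 ^ n < 2 ^ n + 2 ^ n := by omega
        _ = 2 ^ (n + 1) := by ring
        _ ≤ 2 ^ i := Nat.pow_le_pow_right (by norm_num) (by omega))]
    rfl

lemma pv_bxor_bxor (s : Int) (r p : Nat) :
    PySem.Int.bxor (PySem.Int.bxor s ↑r) ↑p = PySem.Int.bxor s ↑(r ^^^ p) := by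
  by_cases hs : 0 ≤ s
  · rw [PySem.Int.bxor_of_nonneg hs (Int.natCast_nonneg r),
      PySem.Int.bxor_of_nonneg (Int.natCast_nonneg _) (Int.natCast_nonneg p),
      PySem.Int.bxor_of_nonneg hs (Int.natCast_nonneg _)]
    simp [Nat.xor_assoc]
  · rw [PySem.Int.bxor.eq_1 s ↑r, if_neg hs, if_pos (Int.natCast_nonneg r)]
    rw [PySem.Int.bxor.eq_1 _ ↑p, if_neg (by simp; omega), if_pos (Int.natCast_nonneg p)]
    rw [PySem.Int.bxor.eq_1 s _, if_neg hs, if_pos (Int.natCast_nonneg _)]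
    have h1 : (-(-↑((-s - 1).toNat ^^^ (↑r : Int).toNat) - 1) - 1 : Int).toNat
        = (-s - 1).toNat ^^^ r := by simp
    rw [h1]
    simp [Nat.xor_assoc]

-- a % 2^(n+1) from a % 2^n and the n-th bit
lemma pv_mod_succ_zero (a : Int) (n : Nat) (h : (a / 2 ^ n) % 2 = 0) :
    a % (2 ^ (n + 1) : Int) = a % (2 ^ n : Int) := by
  have h2 : (0 : Int) < 2 ^ n := by positivity
  have hdm : 2 ^ n * (a / 2 ^ n) + a % 2 ^ n = a := Int.mul_ediv_add_emod a (2 ^ n)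
  have hq : 2 * (a / 2 ^ n / 2) + (a / 2 ^ n) % 2 = a / 2 ^ n := Int.mul_ediv_add_emod _ 2
  have hr0 : 0 ≤ a % (2 ^ n : Int) := Int.emod_nonneg a (by omega)
  have hr1 : a % (2 ^ n : Int) < 2 ^ n := Int.emod_lt_of_pos a h2
  have h1 : a = a % 2 ^ n + 2 ^ (n + 1) * (a / 2 ^ n / 2) := by
    rw [pow_succ]; linear_combination -hdm - (2 ^ n : Int) * hq + (2 ^ n : Int) * h
  calc a % (2 ^ (n + 1) : Int)
      = (a % 2 ^ n + 2 ^ (n + 1) * (a / 2 ^ n / 2)) % 2 ^ (n + 1) := by rw [← h1]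
    _ = a % 2 ^ n % 2 ^ (n + 1) := by rw [Int.add_mul_emod_self_left]
    _ = a % 2 ^ n := Int.emod_eq_of_lt hr0 (by rw [pow_succ]; nlinarith)

lemma pv_mod_succ_one (a : Int) (n : Nat) (h : (a / 2 ^ n) % 2 = 1) :
    a % (2 ^ (n + 1) : Int) = a % (2 ^ n : Int) + 2 ^ n := by
  have h2 : (0 : Int) < 2 ^ n := by positivity
  have hdm : 2 ^ n * (a / 2 ^ n) + a % 2 ^ n = a := Int.mul_ediv_add_emod a (2 ^ n)
  have hq : 2 * (a / 2 ^ n / 2) + (a / 2 ^ n) % 2 = a / 2 ^ n := Int.mul_ediv_add_emod _ 2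
  have hr0 : 0 ≤ a % (2 ^ n : Int) := Int.emod_nonneg a (by omega)
  have hr1 : a % (2 ^ n : Int) < 2 ^ n := Int.emod_lt_of_pos a h2
  have h1 : a = (a % 2 ^ n + 2 ^ n) + 2 ^ (n + 1) * (a / 2 ^ n / 2) := by
    rw [pow_succ]; linear_combination -hdm - (2 ^ n : Int) * hq + (2 ^ n : Int) * h
  calc a % (2 ^ (n + 1) : Int)
      = ((a % 2 ^ n + 2 ^ n) + 2 ^ (n + 1) * (a / 2 ^ n / 2)) % 2 ^ (n + 1) := by rw [← h1]
    _ = (a % 2 ^ n + 2 ^ n) % 2 ^ (n + 1) := by rw [Int.add_mul_emod_self_left]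
    _ = a % 2 ^ n + 2 ^ n := Int.emod_eq_of_lt (by omega) (by rw [pow_succ]; nlinarith)

-- the xor step: current ^ 2^n turns (a % 2^n) into (a % 2^(n+1)) when bit n of a is set
lemma pv_cur_step (s a : Int) (n : Nat) (h : (a / 2 ^ n) % 2 = 1) :
    PySem.Int.bxor (PySem.Int.bxor s (a % (2 ^ n : Int))) ((2 ^ n : Int))
      = PySem.Int.bxor s (a % (2 ^ (n + 1) : Int)) := by
  have h2 : (0 : Int) < 2 ^ n := by positivity
  have hc : ((2 ^ n : Nat) : Int) = 2 ^ n := by push_cast; ring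
  have hr0 : 0 ≤ a % (2 ^ n : Int) := Int.emod_nonneg a (by omega)
  have hr1 : a % (2 ^ n : Int) < 2 ^ n := Int.emod_lt_of_pos a h2
  set r : Nat := (a % (2 ^ n : Int)).toNat with hrdef
  have hr : a % (2 ^ n : Int) = (r : Int) := (Int.toNat_of_nonneg hr0).symm
  have hrlt : r < 2 ^ n := by omega
  rw [hr, ← hc, pv_bxor_bxor, pv_xor_two_pow r n hrlt, pv_mod_succ_one a n h, hr]
  push_cast
  ring_nf

-- main loop invariant: after processing dimensions 0..n-1, A's state is
-- (B's edge list for those dimensions, src ^ (diff mod 2^n))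
lemma pv_loop (s a : Int) (n : Nat) :
    (PySem.List.pyRange 0 (n : Int)).foldl (pvStepA a) ([], s)
      = (((PySem.List.pyRange 0 (n : Int)).filter
            (fun i => PySem.Int.band (a >>> i.toNat) 1 != 0)).map (pvEdgeB s a),
         PySem.Int.bxor s (a % (2 ^ n : Int))) := by
  induction n with
  | zero =>
    simp [PySem.List.pyRange]
  | succ k ih =>
    have hcast : ((k + 1 : Nat) : Int) = (k : Int) + 1 := by push_cast; ring
    rw [hcast, PySem.List.pyRange_one_succ_right (by positivity), List.foldl_append,
      List.filter_append, List.map_append, ih]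
    have htn : ((k : Int)).toNat = k := Int.toNat_natCast k
    by_cases hb : (a / 2 ^ k) % 2 = 1
    · have hcondN : PySem.Int.band (a >>> k) 1 ≠ 0 := (pv_bit_cond a k).mpr hb
      have hcond : PySem.Int.band (a >>> ((k : Int)).toNat) 1 ≠ 0 := by
        rw [htn]; exact hcondN
      have h1 : ∀ (L : List (Int × Int)) (C : Int), List.foldl (pvStepA a) (L, C) [(k : Int)]
          = (L ++ [pvSortPair C (PySem.Int.bxor C ((1 : Int) <<< ((k : Int)).toNat))],
             PySem.Int.bxor C ((1 : Int) <<< ((k : Int)).toNat)) := by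
        intro L C
        simp only [List.foldl_cons, List.foldl_nil, pvStepA, if_pos hcond]
      have h2 : List.filter (fun i => PySem.Int.band (a >>> i.toNat) 1 != 0) [(k : Int)]
          = [(k : Int)] := by
        simp only [List.filter_cons, List.filter_nil, bne_iff_ne, ne_eq]
        rw [if_pos (show ¬ _ = _ by rw [htn, Int.shiftRight_natCast_right]; exact hcondN)]
      rw [h1, h2, List.map_cons, List.map_nil, htn]
      have hedge : pvSortPair (PySem.Int.bxor s (a % (2 ^ k : Int)))
          (PySem.Int.bxor (PySem.Int.bxor s (a % (2 ^ k : Int))) ((1 : Int) <<< k))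
          = pvEdgeB s a (k : Int) := by
        unfold pvEdgeB
        rw [htn, pv_band_mask]
      rw [Prod.mk.injEq]
      refine ⟨by rw [hedge], ?_⟩
      rw [pv_shl1]
      exact pv_cur_step s a k hb
    · have hb0 : (a / 2 ^ k) % 2 = 0 := by
        rcases Int.emod_two_eq_zero_or_one (a / 2 ^ k) with h | h
        · exact h
        · exact absurd h hb
      have hcondN : PySem.Int.band (a >>> k) 1 = 0 := by
        by_contra hc
        exact hb ((pv_bit_cond a k).mp hc)
      have hcond : ¬ PySem.Int.band (a >>> ((k : Int)).toNat) 1 ≠ 0 := by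
        rw [htn]; simp [hcondN]
      have h1 : ∀ (L : List (Int × Int)) (C : Int), List.foldl (pvStepA a) (L, C) [(k : Int)]
          = (L, C) := by
        intro L C
        simp only [List.foldl_cons, List.foldl_nil, pvStepA, if_neg hcond]
      have h2 : List.filter (fun i => PySem.Int.band (a >>> i.toNat) 1 != 0) [(k : Int)]
          = [] := by
        simp only [List.filter_cons, List.filter_nil, bne_iff_ne, ne_eq]
        rw [if_neg (show ¬ ¬ _ = _ by rw [htn, Int.shiftRight_natCast_right]; simp [hcondN])]
      rw [h1, h2, List.map_nil, List.append_nil, pv_mod_succ_zero a k hb0]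

-- ===== VERDICT (by name: the statement is the Claim_ definition above) =====
theorem get_bit_fixing_path_spec : Claim_equal_get_bit_fixing_path := by
  intro src dst dims _
  unfold Spec_get_bit_fixing_path
  simp only [get_bit_fixing_path, get_bit_fixing_path_alt]
  by_cases h : 0 < dims
  · have hd : dims = ((dims.toNat : Nat) : Int) := by omega
    rw [hd, pv_loop src (PySem.Int.bxor src dst) dims.toNat]
  · have hE : PySem.List.pyRange 0 dims = [] := by
      simp [PySem.List.pyRange]
      omega
    rw [hE]
    rfl
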